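-- pv_equiv track=rewrite | github.com/bcaldwell/Arduino-python-serial | serial_ard.py | convert
-- ===== SOURCE A (Python) =====
-- def convert (enter):
-- 	out=""
-- 	for a in range (0,len(enter)):
--
-- 		#if enter[a] is \n or 'enter' return string out
-- 		if (enter[a])==13:
-- 			return out
-- 		else:	#if enter[a] is not \n then add the text value of it to out
-- 			out=out+chr(enter[a])
-- 	#if string is not returns and all characters have been used added, then return out
-- 	return out
-- ===== SOURCE B (Python) =====
-- def convert(enter):
--     cut = next((i for i, v in enumerate(enter) if v == 13), len(enter))
--     return ''.join(chr(c) for c in enter[:cut])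
-- ===== Notes on version B (the rewrite author's own statement) =====
-- stated objective: idiomatic
-- what changed: Replaces the interleaved scan-convert-append loop with early return by a boundary-finding pass (index of the first 13, or the length) followed by a single join over the slice before it.
import Mathlib
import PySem

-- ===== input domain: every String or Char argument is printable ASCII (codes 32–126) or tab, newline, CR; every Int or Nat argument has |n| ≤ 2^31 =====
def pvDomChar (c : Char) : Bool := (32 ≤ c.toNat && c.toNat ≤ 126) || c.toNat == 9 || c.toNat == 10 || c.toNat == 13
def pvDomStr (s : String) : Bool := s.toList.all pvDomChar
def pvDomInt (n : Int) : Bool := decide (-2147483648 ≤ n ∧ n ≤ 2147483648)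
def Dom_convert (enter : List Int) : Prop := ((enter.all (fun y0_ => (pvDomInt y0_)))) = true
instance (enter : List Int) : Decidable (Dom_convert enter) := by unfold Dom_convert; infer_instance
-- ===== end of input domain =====

-- B replaces A's interleaved scan-and-append loop by a boundary-finding pass (first index of 13)
-- followed by a single join over the slice before it.

-- ===== PORT A =====
-- A's for-loop with early return on 13, accumulating `out` by string concatenation.
def convertLoop : List Int → String → String
  | [], out => out
  | a :: rest, out =>
      if a == 13 then out
      else convertLoop rest (out ++ (Char.ofNat a.toNat).toString)

def convert (enter : List Int) : String := convertLoop enter ""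

-- ===== PORT B =====
-- cut = index of first 13 (or len), then join chr over the prefix slice.
def convert_alt (enter : List Int) : String :=
  let cut := enter.findIdx (· == 13)
  String.ofList ((enter.take cut).map (fun c => Char.ofNat c.toNat))

-- ===== PRECONDITION & SPEC =====
-- Pre_ excludes inputs where A raises ValueError in chr (a code < 0 or > 0x10FFFF before the
-- first 13) and codes in the surrogate range 0xD800–0xDFFF, whose chr value a Lean Char/String
-- cannot represent; only elements strictly before the first 13 are ever converted.
def Pre_convert (enter : List Int) : Prop :=
  ∀ c ∈ enter.takeWhile (· ≠ 13), 0 ≤ c ∧ (c < 0xD800 ∨ (0xDFFF < c ∧ c ≤ 0x10FFFF))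
instance (enter : List Int) : Decidable (Pre_convert enter) := by unfold Pre_convert; infer_instance
def pvWitness_convert : List Int := [72, 105, 13, 33]

def Spec_convert (enter : List Int) (out : String) : Prop := out = convert_alt enter
instance (enter : List Int) (out : String) : Decidable (Spec_convert enter out) := by unfold Spec_convert; infer_instance

-- ===== CLAIM (what is proved, stated in full; the proofs are below) =====
def Claim_equal_convert : Prop := ∀ (enter : List Int), Dom_convert enter → Pre_convert enter → Spec_convert enter (convert enter)

-- ===== LEMMAS AND PROOFS =====
theorem convertLoop_eq (l : List Int) : ∀ (out : String),
    convertLoop l out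
      = out ++ String.ofList ((l.take (l.findIdx (· == 13))).map (fun c => Char.ofNat c.toNat)) := by
  induction l with
  | nil => intro out; simp [convertLoop]
  | cons a rest ih =>
      intro out
      by_cases h : a == 13
      · simp [convertLoop, List.findIdx_cons, h]
      · simp only [convertLoop, h, List.findIdx_cons, Bool.cond_eq_ite]
        rw [if_neg (by simpa using h)]
        rw [ih]
        apply String.toList_inj.mp
        simp [Char.toString]

-- ===== VERDICT (by name: the statement is the Claim_ definition above) =====
theorem convert_spec : Claim_equal_convert := by
  intro enter _ _
  unfold Spec_convert convert convert_alt
  exact convertLoop_eq enter ""
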